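-- pv_equiv track=rewrite | github.com/moltude/cairn | cairn/core/writers.py | _utf8_joined_size
-- ===== SOURCE A (Python) =====
-- from typing import List, Optional
--
-- def _utf8_joined_size(lines: List[str]) -> int:
--     """
--     Compute the exact UTF-8 byte size of '\\n'.join(lines) (no trailing newline).
--     """
--     if not lines:
--         return 0
--     total = 0
--     for s in lines:
--         total += len((s or "").encode("utf-8"))
--     # newline between each adjacent pair
--     total += len(lines) - 1
--     return total
-- ===== SOURCE B (Python) =====
-- from typing import List, Optional
--
-- def _utf8_joined_size(lines: List[str]) -> int:
--     return len("\n".join(s or "" for s in lines).encode("utf-8"))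
-- ===== Notes on version B (the rewrite author's own statement) =====
-- stated objective: simpler
-- what changed: Replaces the per-line byte-sum loop plus len(lines)-1 separator arithmetic with a single expression that joins the lines and encodes once.
import Mathlib
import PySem

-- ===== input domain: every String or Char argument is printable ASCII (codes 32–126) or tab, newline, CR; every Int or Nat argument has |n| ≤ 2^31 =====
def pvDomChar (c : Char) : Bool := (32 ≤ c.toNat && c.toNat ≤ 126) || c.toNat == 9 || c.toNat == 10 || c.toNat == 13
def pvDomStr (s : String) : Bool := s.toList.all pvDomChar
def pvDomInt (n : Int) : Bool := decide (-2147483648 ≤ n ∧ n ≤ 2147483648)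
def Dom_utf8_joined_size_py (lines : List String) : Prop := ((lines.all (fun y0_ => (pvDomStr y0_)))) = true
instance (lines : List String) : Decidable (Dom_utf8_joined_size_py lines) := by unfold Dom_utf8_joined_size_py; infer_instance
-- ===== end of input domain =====

-- B computes the size as one expression: join with '\n' and measure once — no per-line
-- accumulation, no len(lines)-1 arithmetic. Return-value equivalence on Dom (ASCII:
-- UTF-8 byte length = code-point length, so len(s.encode('utf-8')) is ported as PySem.Str.len).

-- ===== PORT A =====
-- for s in lines: total += len((s or "").encode("utf-8"));  'or ""' is the identity on str
def utf8_joined_size_py (lines : List String) : Int :=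
  if lines = [] then 0
  else
    (lines.foldl (fun total s => total + PySem.Str.len s) 0) + (PySem.List.len lines - 1)

-- ===== PORT B =====
def utf8_joined_size_py_alt (lines : List String) : Int :=
  PySem.Str.len (PySem.Str.join "\n" lines)

-- ===== PRECONDITION & SPEC =====
def Spec_utf8_joined_size_py (lines : List String) (out : Int) : Prop := out = utf8_joined_size_py_alt lines
instance (lines : List String) (out : Int) : Decidable (Spec_utf8_joined_size_py lines out) := by unfold Spec_utf8_joined_size_py; infer_instance

-- ===== CLAIM (what is proved, stated in full; the proofs are below) =====
def Claim_equal_utf8_joined_size_py : Prop := ∀ (lines : List String), Dom_utf8_joined_size_py lines → Spec_utf8_joined_size_py lines (utf8_joined_size_py lines)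

-- ===== LEMMAS AND PROOFS =====

-- pulling a constant out of the foldl start value (Nat version)
theorem foldl_len_shift_nat (xs : List (List Char)) (a b : Nat) :
    xs.foldl (fun t s => t + s.length) (a + b)
      = xs.foldl (fun t s => t + s.length) a + b := by
  induction xs generalizing a with
  | nil => rfl
  | cons x xt ih =>
      simp only [List.foldl_cons]
      have : a + b + x.length = a + x.length + b := by omega
      rw [this, ih]

-- length of '\n'-joined char lists = sum of lengths + (number of separators)
theorem chars_join_newline_length (l : List Char) (ls : List (List Char)) :
    (PySem.Chars.join ['\n'] (l :: ls)).length
      = (l :: ls).foldl (fun t s => t + s.length) 0 + ls.length := by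
  induction ls generalizing l with
  | nil => simp [PySem.Chars.join, List.intercalate]
  | cons m ms ih =>
      have h1 := ih m
      simp only [PySem.Chars.join_cons_cons, List.length_append, List.length_cons,
        List.length_nil, List.foldl_cons] at *
      rw [foldl_len_shift_nat ms 0 m.length] at h1
      rw [show (0 : Nat) + l.length + m.length = (0 + m.length) + l.length by omega,
        foldl_len_shift_nat ms (0 + m.length) l.length,
        foldl_len_shift_nat ms 0 m.length]
      omega

-- pulling a constant out of the foldl start value (Int version)
theorem foldl_len_shift_int (xs : List String) (a b : Int) :
    xs.foldl (fun t s => t + PySem.Str.len s) (a + b)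
      = xs.foldl (fun t s => t + PySem.Str.len s) a + b := by
  induction xs generalizing a with
  | nil => rfl
  | cons x xt ih =>
      simp only [List.foldl_cons]
      have : a + b + PySem.Str.len x = a + PySem.Str.len x + b := by omega
      rw [this, ih]

-- A's Int accumulation equals the Nat char-count accumulation
theorem foldl_len_eq_nat (xs : List String) :
    xs.foldl (fun t s => t + PySem.Str.len s) 0
      = ((xs.map String.toList).foldl (fun t s => t + s.length) 0 : Nat) := by
  induction xs with
  | nil => rfl
  | cons x xt ih =>
      simp only [List.foldl_cons, List.map_cons]
      rw [show (0 : Int) + PySem.Str.len x = 0 + PySem.Str.len x from rfl,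
        foldl_len_shift_int xt 0 (PySem.Str.len x), ih,
        show (0 : Nat) + x.toList.length = 0 + x.toList.length from rfl,
        foldl_len_shift_nat (xt.map String.toList) 0 x.toList.length]
      simp [PySem.Str.len]

-- ===== VERDICT (by name: the statement is the Claim_ definition above) =====
theorem utf8_joined_size_py_spec : Claim_equal_utf8_joined_size_py := by
  intro lines _
  unfold Spec_utf8_joined_size_py utf8_joined_size_py utf8_joined_size_py_alt
  cases lines with
  | nil => simp [PySem.Str.join, PySem.Chars.join, PySem.Str.len]
  | cons l ls =>
      simp only [if_neg (List.cons_ne_nil l ls)]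
      have hjoin : (PySem.Str.join "\n" (l :: ls)).toList
          = PySem.Chars.join ['\n'] ((l :: ls).map String.toList) := by
        simp [PySem.Str.toList_join]
      have hlen : PySem.Str.len (PySem.Str.join "\n" (l :: ls))
          = ((PySem.Chars.join ['\n'] ((l :: ls).map String.toList)).length : Int) := by
        simp [PySem.Str.len, hjoin]
      rw [hlen, List.map_cons, chars_join_newline_length]
      rw [foldl_len_eq_nat (l :: ls)]
      simp only [PySem.List.len, List.map_cons, List.length_cons, List.length_map]
      push_cast
      omega
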